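-- pv_equiv track=rewrite | github.com/titanscouting/tra-analysis | data analysis/superscript.py | pitloop
-- ===== SOURCE A (Python) =====
-- def pitloop(pit, tests):
--
--     return_vector = {}
--     for team in pit:
--         for variable in pit[team]:
--             if(variable in tests):
--                 if(not variable in return_vector):
--                     return_vector[variable] = []
--                 return_vector[variable].append(pit[team][variable])
--
--     return return_vector
-- ===== SOURCE B (Python) =====
-- def pitloop(pit, tests):
--     # variable-major gathering: discover the matched variables in first-appearance
--     # order, then collect each variable's column with one scan over the teams
--     tset = set(tests)
--     order = [variable for team in pit for variable in pit[team] if variable in tset]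
--     return {v: [pit[team][v] for team in pit if v in pit[team]]
--             for v in dict.fromkeys(order)}
-- ===== Notes on version B (the rewrite author's own statement) =====
-- stated objective: faster
-- what changed: Variable-major regrouping: B first discovers the matched variables in first-appearance order (with a set built from tests for membership) and then gathers each variable's value column in a per-variable scan over the teams, instead of A's entry-major pass that tests 'variable in tests' by list scan and appends into a growing dict.
import Mathlib
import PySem

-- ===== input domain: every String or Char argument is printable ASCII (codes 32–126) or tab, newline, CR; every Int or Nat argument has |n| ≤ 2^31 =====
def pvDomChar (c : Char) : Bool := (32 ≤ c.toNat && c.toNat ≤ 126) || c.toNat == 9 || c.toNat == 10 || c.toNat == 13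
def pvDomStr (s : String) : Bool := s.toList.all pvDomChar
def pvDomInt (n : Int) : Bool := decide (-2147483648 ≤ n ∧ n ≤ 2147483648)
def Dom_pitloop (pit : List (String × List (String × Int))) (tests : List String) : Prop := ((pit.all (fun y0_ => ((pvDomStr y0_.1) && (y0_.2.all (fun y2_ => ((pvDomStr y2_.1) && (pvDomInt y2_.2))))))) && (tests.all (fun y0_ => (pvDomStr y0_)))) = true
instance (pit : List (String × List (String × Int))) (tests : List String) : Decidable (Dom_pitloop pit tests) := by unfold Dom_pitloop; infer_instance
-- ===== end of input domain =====

-- B groups variable-major (discover the matched variables, then gather each variable's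
-- column in one scan over the teams, with a set for the tests-membership test) instead
-- of A's entry-major append-into-dict pass.

-- ===== PORT A =====
-- `for team in pit` yields each entry's key in order, and `pit[team]` / `pit[team][variable]`
-- are that entry's own components because dict keys are unique (Pre_).
def pitloop (pit : List (String × List (String × Int))) (tests : List String) : List (String × List Int) :=
  (pit.foldl (fun rv team =>
      team.2.foldl (fun rv entry =>
          if tests.contains entry.1 then
            let rv' := if rv.contains entry.1 then rv else rv.insert entry.1 []
            rv'.modify entry.1 [] (fun l => l ++ [entry.2])
          else rv)
        rv)
    (PySem.Dict.empty : PySem.Dict String (List Int))).items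

-- ===== PORT B =====
def pitloop_alt (pit : List (String × List (String × Int))) (tests : List String) : List (String × List Int) :=
  let tset : PySem.Set String := PySem.Set.ofList tests
  let order := pit.flatMap (fun team => (team.2.map (fun e => e.1)).filter (fun v => PySem.Set.contains tset v))
  (PySem.List.dedup order).map (fun v =>
    (v, pit.filterMap (fun team => (PySem.Dict.mk team.2).get? v)))

-- ===== PRECONDITION & SPEC =====
-- Pre_ only rules out association lists in which some inner dict carries a duplicate key:
-- such a list encodes no Python dict (Python dict keys are unique), so it is an artefact
-- of the dict-as-list encoding, not an input A ever receives.
def Pre_pitloop (pit : List (String × List (String × Int))) (tests : List String) : Prop :=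
  ∀ team ∈ pit, (team.2.map Prod.fst).Nodup
instance (pit : List (String × List (String × Int))) (tests : List String) : Decidable (Pre_pitloop pit tests) := by unfold Pre_pitloop; infer_instance
def pvWitness_pitloop : (List (String × List (String × Int))) × List String :=
  ([("t1", [("x", 1), ("y", 2)]), ("t2", [("x", 3)])], ["x", "z"])
def Spec_pitloop (pit : List (String × List (String × Int))) (tests : List String) (out : List (String × List Int)) : Prop := out = pitloop_alt pit tests
instance (pit : List (String × List (String × Int))) (tests : List String) (out : List (String × List Int)) : Decidable (Spec_pitloop pit tests out) := by unfold Spec_pitloop; infer_instance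

-- ===== CLAIM (what is proved, stated in full; the proofs are below) =====
def Claim_equal_pitloop : Prop := ∀ (pit : List (String × List (String × Int))) (tests : List String), Dom_pitloop pit tests → Pre_pitloop pit tests → Spec_pitloop pit tests (pitloop pit tests)

-- ===== LEMMAS AND PROOFS =====

-- the matched entries of all teams, flattened in traversal order
def pvEs (pit : List (String × List (String × Int))) (tests : List String) : List (String × Int) :=
  (pit.flatMap (fun team => team.2)).filter (fun q => tests.contains q.1)

-- A's "if absent, insert []; then append" is exactly Dict.modify
lemma pv_sd_modify (rv : PySem.Dict String (List Int)) (k : String) (f : List Int → List Int) :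
    (if rv.contains k then rv else rv.insert k []).modify k [] f = rv.modify k [] f := by
  by_cases h : rv.contains k = true
  · simp [h]
  · rw [if_neg (by simp [h]), PySem.Dict.modify, PySem.Dict.modify,
      PySem.Dict.getD_insert_self, PySem.Dict.insert_insert_self,
      PySem.Dict.getD_of_not_contains rv [] (by simp [h])]

-- A is one grouping fold over the matched entries
lemma pv_A_fold (pit : List (String × List (String × Int))) (tests : List String) :
    pitloop pit tests =
      ((pvEs pit tests).foldl (fun d p => d.modify p.1 [] (fun l => l ++ [p.2]))
        (PySem.Dict.empty : PySem.Dict String (List Int))).items := by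
  unfold pitloop pvEs
  rw [List.foldl_filter, List.foldl_flatMap]
  congr 2
  funext rv q
  congr 1
  funext rv2 e
  by_cases h : tests.contains e.1 = true
  · simp only [h, if_true]
    exact pv_sd_modify rv2 e.1 _
  · simp only [h, Bool.false_eq_true, if_false]

-- A's result, characterised: matched keys in first-appearance order, each with its column
lemma pv_A_char (pit : List (String × List (String × Int))) (tests : List String) :
    pitloop pit tests =
      (PySem.Set.ofList ((pvEs pit tests).map Prod.fst)).map
        (fun v => (v, ((pvEs pit tests).filter (fun q => q.1 == v)).map (fun q => q.2))) := by
  rw [pv_A_fold]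
  have hnd : ((pvEs pit tests).foldl (fun d p => d.modify p.1 [] (fun l => l ++ [p.2]))
      (PySem.Dict.empty : PySem.Dict String (List Int))).keys.Nodup :=
    PySem.Dict.nodup_keys_foldl_modify_key (pvEs pit tests) Prod.fst [] (fun _ p l => l ++ [p.2])
      PySem.Dict.empty (by rw [PySem.Dict.keys_empty]; exact List.nodup_nil)
  rw [PySem.Dict.items_eq_map_keys _ hnd []]
  have hkeys : ((pvEs pit tests).foldl (fun d p => d.modify p.1 [] (fun l => l ++ [p.2]))
      (PySem.Dict.empty : PySem.Dict String (List Int))).keys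
      = PySem.Set.ofList ((pvEs pit tests).map Prod.fst) := by
    have := PySem.Dict.keys_foldl_modify_key (pvEs pit tests) Prod.fst [] (fun _ p l => l ++ [p.2])
      (PySem.Dict.empty : PySem.Dict String (List Int))
    rw [PySem.Dict.keys_empty] at this
    rw [this, PySem.Set.update_nil_left]
  rw [hkeys]
  apply List.map_congr_left
  intro v _
  have := PySem.Dict.getD_foldl_modify_append (pvEs pit tests)
    (PySem.Dict.empty : PySem.Dict String (List Int)) v
  rw [PySem.Dict.getD_empty] at this
  rw [this, List.nil_append]

-- B's key list is the same ordered dedup of matched keys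
lemma pv_B_keys (pit : List (String × List (String × Int))) (tests : List String) :
    (pit.flatMap (fun team => (team.2.map (fun e => e.1)).filter
        (fun v => PySem.Set.contains (PySem.Set.ofList tests) v)))
      = (pvEs pit tests).map Prod.fst := by
  unfold pvEs
  simp only [PySem.Set.contains_eq_listContains, List.contains_eq_mem, PySem.Set.mem_ofList,
    List.filter_map, List.filter_flatMap, List.map_flatMap, Function.comp_def]

-- B's gathered column for a matched key is A's filtered column (inner keys Nodup)
lemma pv_get?_toList (d : List (String × Int)) (v : String) (h : (d.map Prod.fst).Nodup) :
    ((PySem.Dict.mk d).get? v).toList = (d.filter (fun q => q.1 == v)).map (fun q => q.2) := by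
  induction d with
  | nil => rfl
  | cons p rest ih =>
    obtain ⟨k, w⟩ := p
    simp only [List.map_cons, List.nodup_cons] at h
    rw [PySem.Dict.get?_mk_cons]
    by_cases hk : (k == v) = true
    · have hkv : k = v := by simpa using hk
      simp only [hk, if_true, List.filter_cons, Option.toList_some]
      rw [List.filter_eq_nil_iff.mpr, List.map_cons, List.map_nil]
      intro q hq
      simp only [beq_iff_eq]
      intro hqv
      exact h.1 (by subst hkv; exact hqv ▸ List.mem_map_of_mem hq)
    · simp only [hk, Bool.false_eq_true, if_false, List.filter_cons]
      rw [ih h.2]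

lemma pv_gather (pit : List (String × List (String × Int))) (tests : List String)
    (hpre : ∀ team ∈ pit, (team.2.map Prod.fst).Nodup) (v : String) (hv : tests.contains v = true) :
    pit.filterMap (fun team => (PySem.Dict.mk team.2).get? v)
      = ((pvEs pit tests).filter (fun q => q.1 == v)).map (fun q => q.2) := by
  have h1 : (pvEs pit tests).filter (fun q => q.1 == v)
      = (pit.flatMap (fun team => team.2)).filter (fun q => q.1 == v) := by
    unfold pvEs
    rw [List.filter_filter]
    apply List.filter_congr
    intro q _
    by_cases hq : (q.1 == v) = true
    · have hqv : q.1 = v := by simpa using hq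
      simp only [hqv]
      simpa using hv
    · simp [hq]
  rw [h1, List.filterMap_eq_flatMap_toList]
  simp only [List.filter_flatMap, List.map_flatMap]
  apply List.flatMap_congr
  intro team hteam
  exact pv_get?_toList team.2 v (hpre team hteam)

-- ===== VERDICT (by name: the statement is the Claim_ definition above) =====
theorem pitloop_spec : Claim_equal_pitloop := by
  intro pit tests _ hpre
  show pitloop pit tests =
    (PySem.List.dedup (pit.flatMap (fun team => (team.2.map (fun e => e.1)).filter
        (fun v => PySem.Set.contains (PySem.Set.ofList tests) v)))).map
      (fun v => (v, pit.filterMap (fun team => (PySem.Dict.mk team.2).get? v)))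
  rw [pv_A_char, pv_B_keys, PySem.List.dedup_eq_ofList]
  apply List.map_congr_left
  intro v hv
  have hv' : v ∈ (pvEs pit tests).map Prod.fst := by
    simpa using (PySem.Set.mem_ofList _ _).mp hv
  obtain ⟨q, hq, hqv⟩ := List.mem_map.mp hv'
  have hqt : tests.contains q.1 = true := (List.mem_filter.mp hq).2
  rw [Prod.mk.injEq]
  exact ⟨rfl, (pv_gather pit tests hpre v (hqv ▸ hqt)).symm⟩
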